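-- pv_equiv track=rewrite | github.com/torarve/aoc-2015 | day03.py | visit2
-- ===== SOURCE A (Python) =====
-- from typing import Iterable
--
-- def visit2(directions: Iterable) -> set[int]:
--     x, y = 0, 0
--     visited = set([(x,y)])
--     for d in directions:
--         match d:
--             case "<": x -= 1
--             case ">": x += 1
--             case "^": y += 1
--             case "v": y -= 1
--         visited.add((x, y))
--
--     return visited
-- ===== SOURCE B (Python) =====
-- def visit2(directions):
--     def walk(seg):
--         # returns (total displacement of seg, all positions visited starting from (0,0), origin included)
--         if not seg:
--             return (0, 0), [(0, 0)]
--         if len(seg) == 1: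
--             dx, dy = {"<": (-1, 0), ">": (1, 0), "^": (0, 1), "v": (0, -1)}.get(seg[0], (0, 0))
--             return (dx, dy), [(0, 0), (dx, dy)]
--         m = len(seg) // 2
--         (ax, ay), pa = walk(seg[:m])
--         (bx, by), pb = walk(seg[m:])
--         return (ax + bx, ay + by), pa + [(ax + px, ay + py) for px, py in pb[1:]]
--     _, pts = walk(list(directions))
--     return set(pts)
-- ===== Notes on version B (the rewrite author's own statement) =====
-- stated objective: alternative
-- what changed: Replaces the single stateful walk that mutates (x,y) and adds into a set with a divide-and-conquer: each half of the direction list is solved recursively to (displacement, position list), halves are merged by translating the right half's positions by the left half's displacement, and the final position list is collected into a set once.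
import Mathlib
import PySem

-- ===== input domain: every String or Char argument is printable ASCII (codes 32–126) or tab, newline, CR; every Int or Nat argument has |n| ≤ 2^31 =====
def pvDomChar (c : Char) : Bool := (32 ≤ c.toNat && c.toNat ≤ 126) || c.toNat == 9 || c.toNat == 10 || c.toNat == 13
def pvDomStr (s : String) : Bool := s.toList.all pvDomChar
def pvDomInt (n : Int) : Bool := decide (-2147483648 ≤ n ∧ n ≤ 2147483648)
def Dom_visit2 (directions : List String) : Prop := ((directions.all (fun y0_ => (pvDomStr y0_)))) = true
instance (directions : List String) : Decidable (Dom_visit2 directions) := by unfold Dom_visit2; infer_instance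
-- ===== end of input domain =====

-- B replaces the single stateful walk with a divide-and-conquer over the direction list: solve each half to (displacement, position list), translate the right half's positions by the left's displacement, collect the set once (alternative decomposition, same behaviour).


-- ===== PORT A =====
-- one loop: match on d mutates (x, y), then visited.add((x, y))
def visit2 (directions : List String) : List (Int × Int) :=
  let st := directions.foldl
    (fun (s : (Int × Int) × PySem.Set (Int × Int)) d =>
      let p : Int × Int :=
        if d = "<" then (s.1.1 - 1, s.1.2)
        else if d = ">" then (s.1.1 + 1, s.1.2)
        else if d = "^" then (s.1.1, s.1.2 + 1)
        else if d = "v" then (s.1.1, s.1.2 - 1)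
        else (s.1.1, s.1.2)
      (p, PySem.Set.add s.2 p))
    ((0, 0), PySem.Set.ofList [((0 : Int), (0 : Int))])
  st.2

-- ===== PORT B =====
-- {"<": (-1,0), ">": (1,0), "^": (0,1), "v": (0,-1)}.get(d, (0,0))
def visit2Delta (d : String) : Int × Int :=
  (((((PySem.Dict.empty).insert "<" ((-1 : Int), (0 : Int))).insert ">" (1, 0)).insert "^" (0, 1)).insert "v" (0, -1)).getD d (0, 0)

-- walk(seg): (total displacement, every visited position relative to (0,0), origin included);
-- halves are merged by shifting the right half's positions (minus its origin) by the left displacement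
def visit2Walk : List String → (Int × Int) × List (Int × Int)
  | [] => ((0, 0), [(0, 0)])
  | [d] => let p := visit2Delta d; (p, [(0, 0), p])
  | d1 :: d2 :: rest =>
      let seg := d1 :: d2 :: rest
      let m := seg.length / 2
      let a := visit2Walk (seg.take m)
      let b := visit2Walk (seg.drop m)
      ((a.1.1 + b.1.1, a.1.2 + b.1.2),
       a.2 ++ b.2.tail.map (fun p => (a.1.1 + p.1, a.1.2 + p.2)))
  termination_by l => l.length
  decreasing_by
    · simp only [List.length_take, List.length_cons]; omega
    · simp only [List.length_drop, List.length_cons]; omega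

def visit2_alt (directions : List String) : List (Int × Int) :=
  PySem.Set.ofList (visit2Walk directions).2

-- ===== PRECONDITION & SPEC =====
def Spec_visit2 (directions : List String) (out : List (Int × Int)) : Prop := out = visit2_alt directions
instance (directions : List String) (out : List (Int × Int)) : Decidable (Spec_visit2 directions out) := by unfold Spec_visit2; infer_instance

-- ===== CLAIM (what is proved, stated in full; the proofs are below) =====
def Claim_equal_visit2 : Prop := ∀ (directions : List String), Dom_visit2 directions → Spec_visit2 directions (visit2 directions)

-- ===== LEMMAS AND PROOFS =====

-- the sequence of positions visited from (0,0), origin first (proof-side characterisation)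
def visit2Pos : List String → List (Int × Int)
  | [] => [(0, 0)]
  | d :: ds => (0, 0) :: (visit2Pos ds).map (fun p => ((visit2Delta d).1 + p.1, (visit2Delta d).2 + p.2))

def visit2Disp : List String → Int × Int
  | [] => (0, 0)
  | d :: ds => ((visit2Delta d).1 + (visit2Disp ds).1, (visit2Delta d).2 + (visit2Disp ds).2)

theorem visit2Pos_head (l : List String) :
    visit2Pos l = (0, 0) :: (visit2Pos l).tail := by
  cases l <;> rfl

theorem visit2Disp_append (a b : List String) :
    visit2Disp (a ++ b) = ((visit2Disp a).1 + (visit2Disp b).1, (visit2Disp a).2 + (visit2Disp b).2) := by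
  induction a with
  | nil => simp [visit2Disp]
  | cons d ds ih =>
    simp only [List.cons_append, visit2Disp, ih, Prod.mk.injEq]
    constructor <;> ring

theorem visit2Pos_append (a b : List String) :
    visit2Pos (a ++ b)
      = visit2Pos a ++ (visit2Pos b).tail.map
          (fun p => ((visit2Disp a).1 + p.1, (visit2Disp a).2 + p.2)) := by
  induction a with
  | nil =>
    simp only [List.nil_append, visit2Pos, visit2Disp, List.singleton_append, Int.zero_add]
    rw [visit2Pos_head b]
    simp
  | cons d ds ih =>
    simp only [List.cons_append, visit2Pos, ih, List.map_append, List.map_map, visit2Disp]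
    rw [visit2Pos_head ds]
    have hfun : ((fun p : Int × Int => ((visit2Delta d).1 + p.1, (visit2Delta d).2 + p.2)) ∘
        fun p : Int × Int => ((visit2Disp ds).1 + p.1, (visit2Disp ds).2 + p.2))
        = fun p : Int × Int => ((visit2Delta d).1 + (visit2Disp ds).1 + p.1,
                                (visit2Delta d).2 + (visit2Disp ds).2 + p.2) := by
      funext p; simp only [Function.comp_apply, Prod.mk.injEq]; constructor <;> ring
    rw [hfun]

-- the divide-and-conquer walk computes (displacement, position sequence)
theorem visit2Walk_eq (l : List String) : visit2Walk l = (visit2Disp l, visit2Pos l) := by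
  induction hn : l.length using Nat.strong_induction_on generalizing l with
  | _ n ih =>
    match l with
    | [] => simp [visit2Walk, visit2Disp, visit2Pos]
    | [d] => simp [visit2Walk, visit2Disp, visit2Pos]
    | d1 :: d2 :: rest =>
      have hlen : (d1 :: d2 :: rest).length = rest.length + 2 := by simp
      set seg := d1 :: d2 :: rest with hseg
      set m := seg.length / 2 with hm
      have hm1 : 1 ≤ m := by omega
      have hmlt : m < seg.length := by omega
      have hta : (seg.take m).length = m := by
        rw [List.length_take]; omega
      have htb : (seg.drop m).length = seg.length - m := by simp
      have iha := ih (seg.take m).length (by omega) (seg.take m) rfl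
      have ihb := ih (seg.drop m).length (by omega) (seg.drop m) rfl
      rw [visit2Walk]
      simp only [← hseg, ← hm, iha, ihb]
      have hsplit : seg = seg.take m ++ seg.drop m := (List.take_append_drop m seg).symm
      rw [show visit2Disp seg = visit2Disp (seg.take m ++ seg.drop m) from by rw [← hsplit],
          show visit2Pos seg = visit2Pos (seg.take m ++ seg.drop m) from by rw [← hsplit],
          visit2Disp_append, visit2Pos_append]

-- A's match-statement update is the delta-table step
theorem visit2_step_eq (d : String) (x y : Int) :
    (if d = "<" then (x - 1, y)
     else if d = ">" then (x + 1, y)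
     else if d = "^" then (x, y + 1)
     else if d = "v" then (x, y - 1)
     else (x, y) : Int × Int)
    = (x + (visit2Delta d).1, y + (visit2Delta d).2) := by
  simp only [visit2Delta, PySem.Dict.getD_insert, PySem.Dict.getD_empty]
  split_ifs <;> simp_all <;> omega

-- A's loop, started at (x, y) with set s, folds the shifted position sequence (after the origin) into s
theorem visit2_loop_eq (dirs : List String) : ∀ (x y : Int) (s : PySem.Set (Int × Int)),
    (dirs.foldl
      (fun (s : (Int × Int) × PySem.Set (Int × Int)) d =>
        let p : Int × Int :=
          if d = "<" then (s.1.1 - 1, s.1.2)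
          else if d = ">" then (s.1.1 + 1, s.1.2)
          else if d = "^" then (s.1.1, s.1.2 + 1)
          else if d = "v" then (s.1.1, s.1.2 - 1)
          else (s.1.1, s.1.2)
        (p, PySem.Set.add s.2 p))
      ((x, y), s)).2
    = ((visit2Pos dirs).tail.map (fun p => (x + p.1, y + p.2))).foldl PySem.Set.add s := by
  induction dirs with
  | nil => intro x y s; rfl
  | cons d ds ih =>
    intro x y s
    simp only [List.foldl_cons, visit2Pos]
    rw [visit2_step_eq d x y, ih]
    rw [visit2Pos_head ds]
    simp only [List.tail_cons, List.map_cons, List.map_map, List.foldl_cons]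
    have hfun : ((fun p : Int × Int => (x + p.1, y + p.2)) ∘
        fun p : Int × Int => ((visit2Delta d).1 + p.1, (visit2Delta d).2 + p.2))
        = fun p : Int × Int => (x + (visit2Delta d).1 + p.1, y + (visit2Delta d).2 + p.2) := by
      funext p; simp only [Function.comp_apply, Prod.mk.injEq]; constructor <;> ring
    rw [hfun]
    simp

-- ===== VERDICT (by name: the statement is the Claim_ definition above) =====
theorem visit2_spec : Claim_equal_visit2 := by
  intro directions _
  unfold Spec_visit2 visit2 visit2_alt
  rw [visit2Walk_eq]
  simp only [visit2_loop_eq directions 0 0]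
  rw [visit2Pos_head directions]
  simp only [PySem.Set.ofList, List.foldl_cons]
  simp
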